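-- pv_equiv track=rewrite | github.com/Minstrel56/Python | FirstTry/CodeWars/Rectangle into Squares.py | sqInRect
-- ===== SOURCE A (Python) =====
-- def sqInRect(lng, wdth):
--     m=[]
--     x=0
--     if lng == wdth or lng<=0 or wdth <= 0:
--         return None
--     while lng>=1 and wdth>=1:
--         if lng > wdth:
--             x = lng//wdth
--             for i in range (x):
--                 m.append(wdth)
--             lng-=wdth*x
--         elif lng < wdth:
--             x = wdth//lng
--             for i in range (x):
--                 m.append(lng)
--             wdth-=lng*x
--     return m
-- ===== SOURCE B (Python) =====
-- def sqInRect(lng, wdth):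
--     if lng == wdth or lng <= 0 or wdth <= 0:
--         return None
--     m = []
--     while lng > 0 and wdth > 0:
--         if lng >= wdth:
--             m.append(wdth)
--             lng -= wdth
--         else:
--             m.append(lng)
--             wdth -= lng
--     return m
-- ===== Notes on version B (the rewrite author's own statement) =====
-- stated objective: simpler
-- what changed: Replaces A's quotient computation and inner append for-loop with a flat repeated-subtraction loop that cuts exactly one square per iteration (no division, no nested loop, a plain if/else).
import Mathlib
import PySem

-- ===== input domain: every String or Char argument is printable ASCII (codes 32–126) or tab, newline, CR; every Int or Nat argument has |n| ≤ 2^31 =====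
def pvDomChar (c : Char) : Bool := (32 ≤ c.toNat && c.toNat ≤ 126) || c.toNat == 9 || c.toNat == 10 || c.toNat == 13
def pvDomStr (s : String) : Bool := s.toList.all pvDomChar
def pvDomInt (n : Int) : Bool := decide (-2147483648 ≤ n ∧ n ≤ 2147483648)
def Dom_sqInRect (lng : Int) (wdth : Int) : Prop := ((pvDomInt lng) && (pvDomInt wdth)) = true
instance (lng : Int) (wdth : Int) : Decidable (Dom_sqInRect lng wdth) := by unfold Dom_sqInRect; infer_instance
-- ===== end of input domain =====

-- B replaces A's quotient + inner append for-loop by a flat repeated-subtraction loop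
-- cutting one square per iteration (same return value; objective: simpler).

-- ===== PORT A =====
-- A's while loop: state (lng, wdth, m); the inner `for i in range(x): m.append(wdth)` is a
-- fold over pyRange. The `lng = wdth` case inside the loop would not terminate in Python;
-- it is unreachable from sqInRect's entry guard (proved below); the port returns m there.
def sqInRectLoopA (lng : Int) (wdth : Int) (m : List Int) : List Int :=
  if 1 ≤ lng ∧ 1 ≤ wdth then
    if wdth < lng then
      sqInRectLoopA (lng - wdth * PySem.Int.floordiv lng wdth) wdth
        ((PySem.List.pyRange 0 (PySem.Int.floordiv lng wdth) 1).foldl (fun acc _ => acc ++ [wdth]) m)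
    else if lng < wdth then
      sqInRectLoopA lng (wdth - lng * PySem.Int.floordiv wdth lng)
        ((PySem.List.pyRange 0 (PySem.Int.floordiv wdth lng) 1).foldl (fun acc _ => acc ++ [lng]) m)
    else m
  else m
termination_by (lng + wdth).toNat
decreasing_by
  · have h1 : 1 ≤ PySem.Int.floordiv lng wdth := by
      rw [PySem.Int.le_floordiv_iff_mul_le (by omega)]; omega
    have h2 := PySem.Int.floordiv_mul_add_mod lng wdth
    have h4 : wdth * 1 ≤ wdth * PySem.Int.floordiv lng wdth :=
      mul_le_mul_of_nonneg_left h1 (by omega)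
    simp only [mul_comm] at h2 h4 ⊢; omega
  · have h1 : 1 ≤ PySem.Int.floordiv wdth lng := by
      rw [PySem.Int.le_floordiv_iff_mul_le (by omega)]; omega
    have h2 := PySem.Int.floordiv_mul_add_mod wdth lng
    have h4 : lng * 1 ≤ lng * PySem.Int.floordiv wdth lng :=
      mul_le_mul_of_nonneg_left h1 (by omega)
    simp only [mul_comm] at h2 h4 ⊢; omega

def sqInRect (lng : Int) (wdth : Int) : Option (List Int) :=
  if lng = wdth ∨ lng ≤ 0 ∨ wdth ≤ 0 then none
  else some (sqInRectLoopA lng wdth [])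

-- ===== PORT B =====
-- B's while loop: one square per iteration, repeated subtraction.
def sqInRectLoopB (lng : Int) (wdth : Int) (m : List Int) : List Int :=
  if 0 < lng ∧ 0 < wdth then
    if wdth ≤ lng then sqInRectLoopB (lng - wdth) wdth (m ++ [wdth])
    else sqInRectLoopB lng (wdth - lng) (m ++ [lng])
  else m
termination_by (lng + wdth).toNat
decreasing_by
  · omega
  · omega

def sqInRect_alt (lng : Int) (wdth : Int) : Option (List Int) :=
  if lng = wdth ∨ lng ≤ 0 ∨ wdth ≤ 0 then none
  else some (sqInRectLoopB lng wdth [])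

-- ===== PRECONDITION & SPEC =====
def Spec_sqInRect (lng : Int) (wdth : Int) (out : Option (List Int)) : Prop := out = sqInRect_alt lng wdth
instance (lng : Int) (wdth : Int) (out : Option (List Int)) : Decidable (Spec_sqInRect lng wdth out) := by unfold Spec_sqInRect; infer_instance

-- ===== CLAIM (what is proved, stated in full; the proofs are below) =====
def Claim_equal_sqInRect : Prop := ∀ (lng : Int) (wdth : Int), Dom_sqInRect lng wdth → Spec_sqInRect lng wdth (sqInRect lng wdth)

-- ===== LEMMAS AND PROOFS =====

-- appending a constant over a list is appending replicate-many copies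
theorem foldl_append_const (c : Int) (l : List Int) (m : List Int) :
    l.foldl (fun acc _ => acc ++ [c]) m = m ++ List.replicate l.length c := by
  induction l generalizing m with
  | nil => simp
  | cons a t ih => simp [List.foldl, ih, List.replicate_succ]

-- subtracting wdth x times from lng appends x copies of wdth
theorem loopB_strip_left (x : Nat) :
    ∀ (wdth r : Int) (m : List Int), 1 ≤ wdth → 0 ≤ r → r < wdth →
    sqInRectLoopB (wdth * x + r) wdth m = sqInRectLoopB r wdth (m ++ List.replicate x wdth) := by
  induction x with
  | zero => intro wdth r m _ _ _; simp
  | succ x ih =>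
    intro wdth r m hw hr hrw
    have hx : (0:Int) ≤ wdth * x := by positivity
    rw [sqInRectLoopB]
    have hguard : 0 < wdth * (x+1:Nat) + r ∧ 0 < wdth := by push_cast; constructor <;> nlinarith
    rw [if_pos hguard, if_pos (by push_cast; nlinarith)]
    have harg : wdth * (x+1:Nat) + r - wdth = wdth * x + r := by push_cast; ring
    rw [harg, ih wdth r (m ++ [wdth]) hw hr hrw]
    simp [List.replicate_succ]

theorem loopB_strip_right (x : Nat) :
    ∀ (lng r : Int) (m : List Int), 1 ≤ lng → 0 ≤ r → r < lng →
    sqInRectLoopB lng (lng * x + r) m = sqInRectLoopB lng r (m ++ List.replicate x lng) := by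
  induction x with
  | zero => intro lng r m _ _ _; simp
  | succ x ih =>
    intro lng r m hl hr hrl
    have hx : (0:Int) ≤ lng * x := by positivity
    by_cases heq : x = 0 ∧ r = 0
    · obtain ⟨hx0, hr0⟩ := heq
      subst hx0 hr0
      rw [sqInRectLoopB]
      rw [if_pos (by push_cast; omega), if_pos (by push_cast; omega)]
      rw [sqInRectLoopB]
      rw [if_neg (by push_cast; omega)]
      rw [sqInRectLoopB]
      rw [if_neg (by omega)]
      simp
    · have hbig : lng < lng * (x+1:Nat) + r := by
        rcases Nat.eq_zero_or_pos x with h0 | hpos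
        · subst h0; push_cast; omega
        · have : (1:Int) ≤ (x:Int) := by exact_mod_cast hpos
          push_cast; nlinarith
      rw [sqInRectLoopB]
      rw [if_pos ⟨by omega, by omega⟩, if_neg (by omega)]
      have harg : lng * (x+1:Nat) + r - lng = lng * x + r := by push_cast; ring
      rw [harg, ih lng r (m ++ [lng]) hl hr hrl]
      simp [List.replicate_succ]

theorem loopA_eq_loopB (n : Nat) :
    ∀ (lng wdth : Int) (m : List Int), (lng + wdth).toNat ≤ n → lng ≠ wdth →
    sqInRectLoopA lng wdth m = sqInRectLoopB lng wdth m := by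
  induction n with
  | zero =>
    intro lng wdth m hn hne
    rw [sqInRectLoopA, sqInRectLoopB]
    rw [if_neg (by omega), if_neg (by omega)]
  | succ n ih =>
    intro lng wdth m hn hne
    by_cases hg : 1 ≤ lng ∧ 1 ≤ wdth
    · rcases lt_or_gt_of_ne hne with hlt | hgt
      · -- lng < wdth : A divides wdth by lng
        set q := PySem.Int.floordiv wdth lng with hq
        have hq1 : 1 ≤ q := by
          rw [hq, PySem.Int.le_floordiv_iff_mul_le (by omega)]; omega
        have hmod := PySem.Int.floordiv_mul_add_mod wdth lng
        have hmn := PySem.Int.mod_nonneg wdth (b := lng) (by omega)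
        have hml := PySem.Int.mod_lt wdth (b := lng) (by omega)
        set r := PySem.Int.mod wdth lng with hr
        have hql : wdth - lng * q = r := by rw [hr]; rw [← hq] at hmod; nlinarith [hmod]
        have hqt : (q.toNat : Int) = q := Int.toNat_of_nonneg (by omega)
        rw [sqInRectLoopA]
        rw [if_pos hg, if_neg (by omega : ¬ wdth < lng), if_pos hlt]
        rw [foldl_append_const, PySem.List.length_pyRange_one]
        have hlen : ((q - 0).toNat) = q.toNat := by omega
        rw [hlen, hql]
        have hBdecomp : wdth = lng * q.toNat + r := by rw [hqt]; nlinarith [hmod]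
        have hB : sqInRectLoopB lng wdth m
            = sqInRectLoopB lng r (m ++ List.replicate q.toNat lng) := by
          conv_lhs => rw [hBdecomp]
          exact loopB_strip_right q.toNat lng r m (by omega) hmn hml
        rw [hB]
        apply ih lng r _ _ (by omega)
        have hd : lng * 1 ≤ lng * q := mul_le_mul_of_nonneg_left hq1 (by omega)
        omega
      · -- wdth < lng : A divides lng by wdth
        set q := PySem.Int.floordiv lng wdth with hq
        have hq1 : 1 ≤ q := by
          rw [hq, PySem.Int.le_floordiv_iff_mul_le (by omega)]; omega
        have hmod := PySem.Int.floordiv_mul_add_mod lng wdth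
        have hmn := PySem.Int.mod_nonneg lng (b := wdth) (by omega)
        have hml := PySem.Int.mod_lt lng (b := wdth) (by omega)
        set r := PySem.Int.mod lng wdth with hr
        have hql : lng - wdth * q = r := by rw [hr]; rw [← hq] at hmod; nlinarith [hmod]
        have hqt : (q.toNat : Int) = q := Int.toNat_of_nonneg (by omega)
        rw [sqInRectLoopA]
        rw [if_pos hg, if_pos hgt]
        rw [foldl_append_const, PySem.List.length_pyRange_one]
        have hlen : ((q - 0).toNat) = q.toNat := by omega
        rw [hlen, hql]
        have hBdecomp : lng = wdth * q.toNat + r := by rw [hqt]; nlinarith [hmod]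
        have hB : sqInRectLoopB lng wdth m
            = sqInRectLoopB r wdth (m ++ List.replicate q.toNat wdth) := by
          conv_lhs => rw [hBdecomp]
          exact loopB_strip_left q.toNat wdth r m (by omega) hmn hml
        rw [hB]
        apply ih r wdth _ _ (by omega)
        have hd : wdth * 1 ≤ wdth * q := mul_le_mul_of_nonneg_left hq1 (by omega)
        omega
    · rw [sqInRectLoopA, sqInRectLoopB]
      rw [if_neg hg, if_neg (by omega)]

-- ===== VERDICT (by name: the statement is the Claim_ definition above) =====
theorem sqInRect_spec : Claim_equal_sqInRect := by
  intro lng wdth _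
  unfold Spec_sqInRect sqInRect sqInRect_alt
  by_cases h : lng = wdth ∨ lng ≤ 0 ∨ wdth ≤ 0
  · rw [if_pos h, if_pos h]
  · rw [if_neg h, if_neg h]
    exact congrArg some (loopA_eq_loopB (lng + wdth).toNat lng wdth [] le_rfl
      (fun he => h (Or.inl he)))
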